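-- pv_equiv track=rewrite | github.com/Arsen1302/Code-copy-detector | TestData/solutions/problem_1326_5.py | solution_1326_5
-- ===== SOURCE A (Python) =====
-- from typing import List
--
-- def solution_1326_5(nums: List[int]) -> List[int]:
--     res = [0] * len(nums)
--     stack = []
--     for i, num in enumerate(nums):
--         while stack and num > nums[stack[-1]]:
--             res[stack.pop()] += 1
--
--         if stack:
--             res[stack[-1]] += 1
--         stack.append(i)
--
--     return res
-- ===== SOURCE B (Python) =====
-- from typing import List
--
-- def solution_1326_5(nums: List[int]) -> List[int]:
--     res = []
--     for i, h in enumerate(nums):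
--         cnt = 0
--         cur = None
--         for x in nums[i + 1:]:
--             if cur is None or x > cur:
--                 cnt += 1
--                 cur = x
--                 if x > h:
--                     break
--         res.append(cnt)
--     return res
-- ===== Notes on version B (the rewrite author's own statement) =====
-- stated objective: alternative
-- what changed: Replaced A's monotonic-stack single pass by a per-index rightward scan: for each i, walk right keeping a running maximum and count strict new records, stopping once a record exceeds nums[i] (strict, matching A's tie behaviour).
import Mathlib
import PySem

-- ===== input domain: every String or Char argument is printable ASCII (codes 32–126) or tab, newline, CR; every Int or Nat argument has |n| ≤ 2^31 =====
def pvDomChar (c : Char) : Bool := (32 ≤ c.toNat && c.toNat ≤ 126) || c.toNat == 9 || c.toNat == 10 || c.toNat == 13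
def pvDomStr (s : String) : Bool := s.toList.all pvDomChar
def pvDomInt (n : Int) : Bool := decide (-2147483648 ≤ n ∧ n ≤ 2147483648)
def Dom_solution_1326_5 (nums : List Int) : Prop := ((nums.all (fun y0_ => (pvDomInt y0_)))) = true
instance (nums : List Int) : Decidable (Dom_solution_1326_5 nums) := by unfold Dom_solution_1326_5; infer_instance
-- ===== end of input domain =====

-- B replaces A's monotonic stack by a per-index rightward scan with a running maximum
-- (objective: alternative — same values, plainer nested-loop algorithm, O(n^2) vs A's O(n)).

-- ===== PORT A =====
-- shared faithful transliteration of Python's `enumerate(nums)` (Nat indices)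
def pvEnum : Nat → List Int → List (Nat × Int)
  | _, [] => []
  | s, v :: l => (s, v) :: pvEnum (s + 1) l

-- the `while stack and num > nums[stack[-1]]: res[stack.pop()] += 1` loop;
-- stack is kept top-first; stack indices are always in range, so `getD` is exact here
def pvPop (nums : List Int) (num : Int) : List Int → List Nat → List Int × List Nat
  | res, [] => (res, [])
  | res, t :: st =>
    if num > nums.getD t 0 then pvPop nums num (res.modify t (· + 1)) st
    else (res, t :: st)

def pvLoopA (nums : List Int) : List (Nat × Int) → List Int → List Nat → List Int
  | [], res, _stack => res
  | (i, num) :: rest, res, stack =>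
    let p := pvPop nums num res stack
    let res2 := match p.2 with
      | [] => p.1
      | t :: _ => p.1.modify t (· + 1)   -- `if stack: res[stack[-1]] += 1`
    pvLoopA nums rest res2 (i :: p.2)    -- `stack.append(i)`

def solution_1326_5 (nums : List Int) : List Int :=
  pvLoopA nums (pvEnum 0 nums) (List.replicate nums.length 0) []

-- ===== PORT B =====
-- inner scan of Source B: `for x in nums[i+1:]`, cnt accumulated as 1 + …, cur starts as None
def pvVis (h : Int) : Option Int → List Int → Int
  | _, [] => 0
  | cur, x :: t =>
    if cur.all (fun c => decide (x > c)) then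
      (if x > h then 1 else 1 + pvVis h (some x) t)
    else pvVis h cur t

def solution_1326_5_alt (nums : List Int) : List Int :=
  (pvEnum 0 nums).map (fun p => pvVis p.2 none (nums.drop (p.1 + 1)))

-- ===== PRECONDITION & SPEC =====
def Spec_solution_1326_5 (nums : List Int) (out : List Int) : Prop := out = solution_1326_5_alt nums
instance (nums : List Int) (out : List Int) : Decidable (Spec_solution_1326_5 nums out) := by unfold Spec_solution_1326_5; infer_instance

-- ===== CLAIM (what is proved, stated in full; the proofs are below) =====
def Claim_equal_solution_1326_5 : Prop := ∀ (nums : List Int), Dom_solution_1326_5 nums → Spec_solution_1326_5 nums (solution_1326_5 nums)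

-- ===== LEMMAS AND PROOFS =====

-- enumerate with a shifted start is the shifted enumerate
theorem pvEnum_succ (l : List Int) : ∀ s, pvEnum (s + 1) l = (pvEnum s l).map (fun p => (p.1 + 1, p.2)) := by
  induction l with
  | nil => intro s; rfl
  | cons v l ih => intro s; simp [pvEnum, ih (s + 1)]

theorem pvEnum_map_snd (l : List Int) : ∀ s, (pvEnum s l).map (·.2) = l := by
  induction l with
  | nil => intro s; rfl
  | cons v l ih => intro s; simp [pvEnum, ih (s + 1)]

theorem pvEnum_getD (l : List Int) : ∀ p ∈ pvEnum 0 l, l.getD p.1 0 = p.2 := by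
  induction l with
  | nil => intro p hp; cases hp
  | cons v l ih =>
    intro p hp
    rw [pvEnum, pvEnum_succ] at hp
    rcases List.mem_cons.1 hp with h | h
    · subst h; rfl
    · rcases List.mem_map.1 h with ⟨q, hq, rfl⟩
      simpa using ih q hq

-- popping never touches the surviving part of the stack: result is a suffix
theorem pvPop_suffix (nums : List Int) (num : Int) : ∀ st res, (pvPop nums num res st).2 <:+ st := by
  intro st
  induction st with
  | nil => intro res; simp [pvPop]
  | cons t st ih =>
    intro res
    by_cases h : num > nums.getD t 0
    · simp only [pvPop, if_pos h]
      exact (ih _).trans (List.suffix_cons t st)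
    · simp only [pvPop]
      rw [if_neg h]

theorem pvPop_empty_iff (nums : List Int) (num : Int) : ∀ st res, (pvPop nums num res st).2 = [] ↔ ∀ t ∈ st, nums.getD t 0 < num := by
  intro st
  induction st with
  | nil => intro res; simp [pvPop]
  | cons t st ih =>
    intro res
    by_cases h : num > nums.getD t 0
    · simp only [pvPop, if_pos h]
      rw [ih]
      constructor
      · intro hall u hu
        rcases List.mem_cons.1 hu with rfl | hu
        · exact h
        · exact hall u hu
      · intro hall u hu; exact hall u (List.mem_cons_of_mem _ hu)
    · simp only [pvPop, if_neg h]
      constructor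
      · intro hc; cases hc
      · intro hall; exact absurd (hall t (List.mem_cons_self)) h

theorem pvPop_surv (nums : List Int) (num : Int) : ∀ st res t rest, (pvPop nums num res st).2 = t :: rest → num ≤ nums.getD t 0 := by
  intro st
  induction st with
  | nil => intro res t rest h; simp [pvPop] at h
  | cons u st ih =>
    intro res t rest h
    by_cases hc : num > nums.getD u 0
    · simp only [pvPop, if_pos hc] at h
      exact ih _ _ _ h
    · simp only [pvPop, if_neg hc] at h
      cases h; omega

-- simulation of the pop loop after index 0 has been popped
theorem pvPop_corr2 (x : Int) (xs : List Int) (num : Int) : ∀ st2 res2 r0,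
    pvPop (x :: xs) num (r0 :: res2) (st2.map (· + 1)) =
      ((r0 :: (pvPop xs num res2 st2).1), ((pvPop xs num res2 st2).2).map (· + 1)) := by
  intro st2
  induction st2 with
  | nil => intro res2 r0; simp [pvPop]
  | cons t st ih =>
    intro res2 r0
    by_cases h : num > xs.getD t 0
    · have hg : (x :: xs).getD (t + 1) 0 = xs.getD t 0 := rfl
      simp only [List.map_cons, pvPop, hg, if_pos h]
      have hm : (r0 :: res2).modify (t + 1) (· + 1) = r0 :: res2.modify t (· + 1) := rfl
      rw [hm, ih]
    · have hg : (x :: xs).getD (t + 1) 0 = xs.getD t 0 := rfl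
      simp only [List.map_cons, pvPop, hg, if_neg h]

-- simulation of the pop loop while index 0 is still at the bottom of the stack
theorem pvPop_corr1 (x : Int) (xs : List Int) (num : Int) : ∀ st2 res2 r0,
    pvPop (x :: xs) num (r0 :: res2) (st2.map (· + 1) ++ [0]) =
      (if (pvPop xs num res2 st2).2 = [] then
        (if num > x then (((r0 + 1) :: (pvPop xs num res2 st2).1), ([] : List Nat))
         else ((r0 :: (pvPop xs num res2 st2).1), [0]))
       else ((r0 :: (pvPop xs num res2 st2).1), ((pvPop xs num res2 st2).2).map (· + 1) ++ [0])) := by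
  intro st2
  induction st2 with
  | nil =>
    intro res2 r0
    by_cases h : num > x
    · simp [pvPop, h]
    · simp [pvPop, h]
  | cons t st ih =>
    intro res2 r0
    by_cases h : num > xs.getD t 0
    · have hg : (x :: xs).getD (t + 1) 0 = xs.getD t 0 := rfl
      simp only [List.map_cons, List.cons_append, pvPop, hg, if_pos h]
      have hm : (r0 :: res2).modify (t + 1) (· + 1) = r0 :: res2.modify t (· + 1) := rfl
      rw [hm, ih]
    · have hg : (x :: xs).getD (t + 1) 0 = xs.getD t 0 := rfl
      simp only [List.map_cons, List.cons_append, pvPop, hg, if_neg h]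
      rw [if_neg (List.cons_ne_nil t st)]

-- phase 2: index 0 has been popped; the two runs agree entry-for-entry, indices shifted by one
theorem pvLoop_corr2 (x : Int) (xs : List Int) : ∀ L res2 st2 r0,
    pvLoopA (x :: xs) (L.map (fun p => (p.1 + 1, p.2))) (r0 :: res2) (st2.map (· + 1)) =
      r0 :: pvLoopA xs L res2 st2 := by
  intro L
  induction L with
  | nil => intro res2 st2 r0; rfl
  | cons e L ih =>
    intro res2 st2 r0
    obtain ⟨i, num⟩ := e
    simp only [List.map_cons, pvLoopA, pvPop_corr2]
    cases hq : (pvPop xs num res2 st2).2 with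
    | nil => simpa [hq] using ih (pvPop xs num res2 st2).1 (i :: []) r0
    | cons t st' =>
      have hm : (r0 :: (pvPop xs num res2 st2).1).modify (t + 1) (· + 1) =
          r0 :: (pvPop xs num res2 st2).1.modify t (· + 1) := rfl
      simpa [hq, hm] using ih ((pvPop xs num res2 st2).1.modify t (· + 1)) (i :: t :: st') r0

-- stack invariant driving phase 1: cur is the running maximum of the processed values,
-- every stacked value is ≤ cur, and the bottom of the stack attains cur
def StInv (xs : List Int) (cur : Option Int) (st2 : List Nat) : Prop :=
  match cur with
  | none => st2 = []
  | some m => (∀ t ∈ st2, xs.getD t 0 ≤ m) ∧ ∃ b pre, st2 = pre ++ [b] ∧ xs.getD b 0 = m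

-- phase 1: index 0 is still at the bottom; its running credit equals B's scan pvVis
theorem pvLoop_corr1 (x : Int) (xs : List Int) : ∀ L cur st2 res2 r0,
    (∀ p ∈ L, xs.getD p.1 0 = p.2) →
    StInv xs cur st2 →
    pvLoopA (x :: xs) (L.map (fun p => (p.1 + 1, p.2))) (r0 :: res2) (st2.map (· + 1) ++ [0]) =
      (r0 + pvVis x cur (L.map (·.2))) :: pvLoopA xs L res2 st2 := by
  intro L
  induction L with
  | nil => intro cur st2 res2 r0 _ _; simp [pvLoopA, pvVis]
  | cons e L ih =>
    intro cur st2 res2 r0 HL Hinv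
    obtain ⟨i, num⟩ := e
    have hnum : xs.getD i 0 = num := HL (i, num) List.mem_cons_self
    have HL' : ∀ p ∈ L, xs.getD p.1 0 = p.2 := fun p hp => HL p (List.mem_cons_of_mem _ hp)
    simp only [List.map_cons, pvLoopA, pvPop_corr1]
    by_cases hq : (pvPop xs num res2 st2).2 = []
    · -- full pop of the shifted part: num is a new record
      have hrec : cur.all (fun c => decide (num > c)) = true := by
        cases cur with
        | none => rfl
        | some m =>
          rcases Hinv with ⟨_, b, pre, hst, hb⟩
          have hall := (pvPop_empty_iff xs num st2 res2).1 hq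
          have hbmem : b ∈ st2 := by rw [hst]; exact List.mem_append_right _ List.mem_cons_self
          have := hall b hbmem
          simp only [Option.all_some, decide_eq_true_eq]
          omega
      by_cases hx : num > x
      · -- break: index 0 popped, switch to phase 2
        simp only [hq, if_true, if_pos hx]
        have h2 := pvLoop_corr2 x xs L (pvPop xs num res2 st2).1 [i] (r0 + 1)
        simp only [List.map_cons, List.map_nil] at h2
        rw [h2]
        simp [pvVis, hrec, hx]
      · -- counted but no break: cur becomes num, stack becomes [i] under 0
        simp only [hq, if_true, if_neg hx]
        have hm0 : (r0 :: (pvPop xs num res2 st2).1).modify 0 (· + 1) =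
            (r0 + 1) :: (pvPop xs num res2 st2).1 := rfl
        have hinv' : StInv xs (some num) [i] := by
          refine ⟨?_, i, [], rfl, hnum⟩
          intro t ht; rcases List.mem_singleton.1 ht with rfl; omega
        have h1 := ih (some num) [i] (pvPop xs num res2 st2).1 (r0 + 1) HL' hinv'
        simp only [List.map_cons, List.map_nil, List.cons_append, List.nil_append] at h1
        rw [hm0, h1]
        simp [pvVis, hrec, hx]
        ring
    · -- partial pop: the survivor's value blocks num, no credit to 0, invariant preserved
      cases hq2 : (pvPop xs num res2 st2).2 with
      | nil => exact absurd hq2 hq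
      | cons t st' =>
        have ht_le : num ≤ xs.getD t 0 := pvPop_surv xs num st2 res2 t st' hq2
        have hsuff : (t :: st') <:+ st2 := hq2 ▸ pvPop_suffix xs num st2 res2
        have htmem : t ∈ st2 := hsuff.subset List.mem_cons_self
        have hcur : ∃ m, cur = some m := by
          cases cur with
          | none =>
            have : st2 = [] := Hinv
            subst this; simp at htmem
          | some m => exact ⟨m, rfl⟩
        rcases hcur with ⟨m, rfl⟩
        rcases Hinv with ⟨hle, b, pre, hstb, hbval⟩
        have hnotrec : ((some m).all (fun c => decide (num > c))) = false := by
          have := hle t htmem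
          simp only [Option.all_some, decide_eq_false_iff_not]
          omega
        simp only [if_neg (by simp : ¬(t :: st' = ([] : List Nat)))]
        have hm1 : (r0 :: (pvPop xs num res2 st2).1).modify (t + 1) (· + 1) =
            r0 :: (pvPop xs num res2 st2).1.modify t (· + 1) := rfl
        have hinv' : StInv xs (some m) (i :: t :: st') := by
          refine ⟨?_, ?_⟩
          · intro u hu
            rcases List.mem_cons.1 hu with rfl | hu
            · have := hle t htmem; omega
            · exact hle u (hsuff.subset hu)
          · -- the suffix keeps the same bottom element b
            rcases hsuff with ⟨pre', hpre'⟩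
            have hlast : (t :: st').getLast? = some b := by
              have h1 : (pre' ++ t :: st').getLast? = (t :: st').getLast? :=
                List.getLast?_append_of_ne_nil pre' (by simp)
              rw [hpre', hstb] at h1
              simpa using h1.symm
            have hpre2 : t :: st' = (t :: st').dropLast ++ [b] :=
              (List.dropLast_append_getLast? b hlast).symm
            exact ⟨b, i :: (t :: st').dropLast, by rw [List.cons_append, ← hpre2], hbval⟩
        have := ih (some m) (i :: t :: st') ((pvPop xs num res2 st2).1.modify t (· + 1)) r0 HL' hinv'
        simp only [List.map_cons, List.cons_append] at this ⊢
        rw [hm1, this]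
        simp [pvVis, hnotrec]

-- one step of A at the head: A (x :: xs) = vis x xs :: A xs
theorem A_cons (x : Int) (xs : List Int) :
    solution_1326_5 (x :: xs) = pvVis x none xs :: solution_1326_5 xs := by
  unfold solution_1326_5
  have h0 : pvEnum 0 (x :: xs) = (0, x) :: (pvEnum 0 xs).map (fun p => (p.1 + 1, p.2)) := by
    rw [pvEnum, pvEnum_succ]
  rw [h0]
  have hrep : List.replicate (x :: xs).length (0 : Int) = 0 :: List.replicate xs.length 0 := rfl
  rw [hrep]
  simp only [pvLoopA, pvPop]
  have hstack : ((0 : Nat) :: []) = (([] : List Nat).map (· + 1)) ++ [0] := rfl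
  rw [hstack, pvLoop_corr1 x xs (pvEnum 0 xs) none [] (List.replicate xs.length 0) 0
      (pvEnum_getD xs) rfl]
  rw [pvEnum_map_snd xs 0]
  norm_num

theorem B_cons (x : Int) (xs : List Int) :
    solution_1326_5_alt (x :: xs) = pvVis x none xs :: solution_1326_5_alt xs := by
  unfold solution_1326_5_alt
  rw [pvEnum, pvEnum_succ]
  simp [List.map_map, Function.comp]

-- the combined induction: A and B agree on every list
theorem A_eq_B (nums : List Int) : solution_1326_5 nums = solution_1326_5_alt nums := by
  induction nums with
  | nil => rfl
  | cons x xs ih => rw [A_cons, B_cons, ih]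

-- ===== VERDICT (by name: the statement is the Claim_ definition above) =====
theorem solution_1326_5_spec : Claim_equal_solution_1326_5 := by
  intro nums _
  exact A_eq_B nums
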